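-- pv_equiv track=rewrite | github.com/daniel-reich/turbo-robot | X3pz4ccSx2k7HikBL_9.py | showdown
-- ===== SOURCE A (Python) =====
-- def showdown(p1, p2):
--   plen,p2len = 0,0
--   for char in p1:
--     if char == " ":
--       plen+=1
--     else:
--       break
--   for char in p2:
--     if char == " ":
--       p2len+=1
--     else:
--       break
--   if plen<p2len:
--     return "p1"
--   elif plen>p2len:
--     return "p2"
--   else:
--     return "tie"
-- ===== SOURCE B (Python) =====
-- def showdown(p1, p2):
--     # Lockstep scan: no counting at all. Walk both strings in parallel while
--     # both are still in their leading-space run; at the first index where the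
--     # runs diverge, the string that stopped first (shorter run) wins.
--     i = 0
--     while True:
--         sa = i < len(p1) and p1[i] == ' '
--         sb = i < len(p2) and p2[i] == ' '
--         if sa and sb:
--             i += 1
--         elif sa:
--             return "p2"
--         elif sb:
--             return "p1"
--         else:
--             return "tie"
-- ===== Notes on version B (the rewrite author's own statement) =====
-- stated objective: alternative
-- what changed: Instead of counting each string's leading spaces separately and comparing the two counts, B walks both strings in lockstep with a single index and decides at the first position where one leading-space run ends before the other; no counts are ever computed.
import Mathlib
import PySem

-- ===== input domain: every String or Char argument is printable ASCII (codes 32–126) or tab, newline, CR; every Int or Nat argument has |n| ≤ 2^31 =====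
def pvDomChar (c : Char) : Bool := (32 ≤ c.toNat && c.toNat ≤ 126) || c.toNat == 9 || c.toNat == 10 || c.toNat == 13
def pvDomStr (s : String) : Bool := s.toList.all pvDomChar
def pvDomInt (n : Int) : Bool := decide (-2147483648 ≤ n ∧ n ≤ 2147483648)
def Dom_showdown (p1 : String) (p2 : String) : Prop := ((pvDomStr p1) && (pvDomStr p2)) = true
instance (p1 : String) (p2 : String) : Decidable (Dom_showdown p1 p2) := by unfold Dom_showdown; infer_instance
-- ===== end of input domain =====

-- B replaces A's two separate counting loops by a single lockstep scan of both strings that decides at the first divergence of the leading-space runs, computing no counts; objective: alternative.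


-- ===== PORT A =====
-- A's for-loop with break: count characters while they are ' ', stop at the first non-space.
def showdownLoop (cs : List Char) (acc : Int) : Int :=
  match cs with
  | [] => acc
  | c :: rest => if c == ' ' then showdownLoop rest (acc + 1) else acc

def showdown (p1 : String) (p2 : String) : String :=
  let plen := showdownLoop p1.toList 0
  let p2len := showdownLoop p2.toList 0
  if plen < p2len then "p1"
  else if plen > p2len then "p2"
  else "tie"

-- ===== PORT B =====
-- B's while-loop with index i over both strings: advancing i in lockstep is, structurally,
-- recursing on both character lists at once; sa/sb are the 'i < len && s[i] == " "' tests.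
def altLoop (l1 l2 : List Char) : String :=
  match l1, l2 with
  | a :: r1, b :: r2 =>
    if a == ' ' && b == ' ' then altLoop r1 r2
    else if a == ' ' then "p2"
    else if b == ' ' then "p1"
    else "tie"
  | a :: _, [] => if a == ' ' then "p2" else "tie"
  | [], b :: _ => if b == ' ' then "p1" else "tie"
  | [], [] => "tie"

def showdown_alt (p1 : String) (p2 : String) : String :=
  altLoop p1.toList p2.toList

-- ===== PRECONDITION & SPEC =====
def Spec_showdown (p1 : String) (p2 : String) (out : String) : Prop := out = showdown_alt p1 p2
instance (p1 : String) (p2 : String) (out : String) : Decidable (Spec_showdown p1 p2 out) := by unfold Spec_showdown; infer_instance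

-- ===== CLAIM (what is proved, stated in full; the proofs are below) =====
def Claim_equal_showdown : Prop := ∀ (p1 : String) (p2 : String), Dom_showdown p1 p2 → Spec_showdown p1 p2 (showdown p1 p2)

-- ===== LEMMAS AND PROOFS =====
theorem showdownLoop_shift (cs : List Char) (acc : Int) :
    showdownLoop cs acc = acc + showdownLoop cs 0 := by
  induction cs generalizing acc with
  | nil => simp [showdownLoop]
  | cons c rest ih =>
    by_cases h : c = ' '
    · simp only [showdownLoop, h]
      rw [if_pos (by decide), if_pos (by decide), ih (acc + 1), ih (0 + 1)]
      ring
    · simp [showdownLoop, h]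

theorem showdownLoop_nonneg (cs : List Char) : 0 ≤ showdownLoop cs 0 := by
  induction cs with
  | nil => simp [showdownLoop]
  | cons c rest ih =>
    by_cases h : c = ' '
    · simp only [showdownLoop, h]
      rw [if_pos (by decide), showdownLoop_shift]
      omega
    · simp [showdownLoop, h]

theorem showdownLoop_cons (c : Char) (rest : List Char) :
    showdownLoop (c :: rest) 0 = if c = ' ' then 1 + showdownLoop rest 0 else 0 := by
  by_cases h : c = ' '
  · simp only [showdownLoop, h]
    rw [if_pos (by decide)]
    rw [if_pos trivial]
    rw [showdownLoop_shift]
    ring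
  · simp [showdownLoop, h]

theorem altLoop_eq (l1 l2 : List Char) :
    altLoop l1 l2 =
      (if showdownLoop l1 0 < showdownLoop l2 0 then "p1"
       else if showdownLoop l1 0 > showdownLoop l2 0 then "p2"
       else "tie") := by
  induction l1 generalizing l2 with
  | nil =>
    cases l2 with
    | nil => simp [altLoop, showdownLoop]
    | cons b r2 =>
      have := showdownLoop_nonneg r2
      rw [showdownLoop_cons]
      by_cases hb : b = ' ' <;>
        simp [altLoop, showdownLoop, hb] <;>
        split_ifs <;> first | rfl | omega
  | cons a r1 ih =>
    cases l2 with
    | nil =>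
      have := showdownLoop_nonneg r1
      rw [showdownLoop_cons]
      by_cases ha : a = ' ' <;>
        simp [altLoop, showdownLoop, ha] <;>
        split_ifs <;> first | rfl | omega
    | cons b r2 =>
      have h1 := showdownLoop_nonneg r1
      have h2 := showdownLoop_nonneg r2
      rw [showdownLoop_cons, showdownLoop_cons]
      by_cases ha : a = ' ' <;> by_cases hb : b = ' ' <;>
        simp [altLoop, ha, hb, ih r2] <;>
        split_ifs <;> first | rfl | omega

-- ===== VERDICT (by name: the statement is the Claim_ definition above) =====
theorem showdown_spec : Claim_equal_showdown := by
  intro p1 p2 _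
  unfold Spec_showdown showdown showdown_alt
  rw [altLoop_eq]
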